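-- pv_equiv track=rewrite | github.com/Humpnduati/25h--MachineLearing-1 | Weekly Project/Week 3/.ipynb_checkpoints/COMPREHENSIVE CREDIT RISK MODELING -checkpoint.py | categorize_customers
-- ===== SOURCE A (Python) =====
-- def categorize_customers(credit_scores):
--     """Categorize customers based on credit scores"""
--
--     categories = []
--     for score in credit_scores:
--         if score >= 750:
--             categories.append('Excellent')
--         elif score >= 700:
--             categories.append('Good')
--         elif score >= 650:
--             categories.append('Fair')
--         elif score >= 600:
--             categories.append('Poor')
--         else:
--             categories.append('Very Poor')
--
--     return categories
-- ===== SOURCE B (Python) =====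
-- import bisect
--
-- THRESHOLDS = [600, 650, 700, 750]
-- LABELS = ['Very Poor', 'Poor', 'Fair', 'Good', 'Excellent']
--
-- def categorize_customers(credit_scores):
--     """Categorize customers based on credit scores"""
--     return [LABELS[bisect.bisect_right(THRESHOLDS, score)] for score in credit_scores]
-- ===== Notes on version B (the rewrite author's own statement) =====
-- stated objective: idiomatic
-- what changed: Replaces the if/elif comparison chain and append loop by a precomputed sorted threshold table with bisect_right index lookup in a list comprehension.
import Mathlib
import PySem

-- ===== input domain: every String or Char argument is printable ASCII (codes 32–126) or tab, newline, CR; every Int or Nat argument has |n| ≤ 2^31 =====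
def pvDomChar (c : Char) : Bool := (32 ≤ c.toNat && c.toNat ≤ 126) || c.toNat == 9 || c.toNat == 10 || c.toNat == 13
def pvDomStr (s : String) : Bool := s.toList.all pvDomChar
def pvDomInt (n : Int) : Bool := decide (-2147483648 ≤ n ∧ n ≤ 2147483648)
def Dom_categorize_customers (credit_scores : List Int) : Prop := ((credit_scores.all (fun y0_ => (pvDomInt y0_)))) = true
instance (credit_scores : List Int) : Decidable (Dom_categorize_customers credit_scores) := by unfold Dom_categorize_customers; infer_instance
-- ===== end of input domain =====

-- B replaces A's if/elif chain with a sorted threshold table + bisect_right lookup (idiomatic; same cost).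


-- ===== PORT A =====
def categorize_customers (credit_scores : List Int) : List String :=
  credit_scores.foldl (fun categories score =>
    if score ≥ 750 then categories ++ ["Excellent"]
    else if score ≥ 700 then categories ++ ["Good"]
    else if score ≥ 650 then categories ++ ["Fair"]
    else if score ≥ 600 then categories ++ ["Poor"]
    else categories ++ ["Very Poor"]) []

-- ===== PORT B =====
def pvThresholds : List Int := [600, 650, 700, 750]
def pvLabels : List String := ["Very Poor", "Poor", "Fair", "Good", "Excellent"]

def categorize_customers_alt (credit_scores : List Int) : List String :=
  credit_scores.map (fun score =>
    (PySem.List.pyGet? pvLabels (PySem.List.bisectRight pvThresholds score)).getD "")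

-- ===== PRECONDITION & SPEC =====
def Spec_categorize_customers (credit_scores : List Int) (out : List String) : Prop := out = categorize_customers_alt credit_scores
instance (credit_scores : List Int) (out : List String) : Decidable (Spec_categorize_customers credit_scores out) := by unfold Spec_categorize_customers; infer_instance

-- ===== CLAIM (what is proved, stated in full; the proofs are below) =====
def Claim_equal_categorize_customers : Prop := ∀ (credit_scores : List Int), Dom_categorize_customers credit_scores → Spec_categorize_customers credit_scores (categorize_customers credit_scores)

-- ===== LEMMAS AND PROOFS =====

-- pointwise: A's branch chain equals B's table lookup for any single score
lemma pv_point (s : Int) :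
    (if s ≥ 750 then "Excellent"
     else if s ≥ 700 then "Good"
     else if s ≥ 650 then "Fair"
     else if s ≥ 600 then "Poor"
     else "Very Poor")
    = (PySem.List.pyGet? pvLabels (PySem.List.bisectRight pvThresholds s)).getD "" := by
  simp only [pvThresholds, pvLabels]
  split_ifs with h1 h2 h3 h4 <;>
    (simp [PySem.List.bisectRight, PySem.List.bisectRightLoop]
     split_ifs <;> first | omega | simp [PySem.List.pyGet?, PySem.List.pyIdx?])

-- ===== VERDICT (by name: the statement is the Claim_ definition above) =====
theorem categorize_customers_spec : Claim_equal_categorize_customers := by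
  intro credit_scores _
  unfold Spec_categorize_customers categorize_customers categorize_customers_alt
  have h : ∀ (acc : List String) (s : Int),
      (if s ≥ 750 then acc ++ ["Excellent"]
       else if s ≥ 700 then acc ++ ["Good"]
       else if s ≥ 650 then acc ++ ["Fair"]
       else if s ≥ 600 then acc ++ ["Poor"]
       else acc ++ ["Very Poor"])
      = acc ++ [(PySem.List.pyGet? pvLabels (PySem.List.bisectRight pvThresholds s)).getD ""] := by
    intro acc s
    rw [← pv_point s]
    split_ifs <;> rfl
  simp only [h]
  rw [PySem.List.foldl_append_singleton_eq_map]
  simp
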